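-- pv_equiv track=rewrite | github.com/justcatthefish/justctf-2022 | challenges/re_amxx/private/solver/encoder.py | stage3
-- ===== SOURCE A (Python) =====
-- def stage3(input):
--     b = 12314
--
--     for i, c in enumerate(input):
--         b += c * 0xDEAD
--         b += 1
--         b %= 0x1000
--         input[i] = b
--
--     return input
-- ===== SOURCE B (Python) =====
-- def stage3(input):
--     s = sum(input)
--     for i in reversed(range(len(input))):
--         c = input[i]
--         input[i] = (12315 + i + 0xDEAD * s) % 0x1000
--         s -= c
--     return input
-- ===== Notes on version B (the rewrite author's own statement) =====
-- stated objective: alternative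
-- what changed: B computes the total sum of the input once, then fills the list BACK-TO-FRONT, at each index i writing the closed form (12315 + i + 0xDEAD*prefix_sum_i) % 0x1000 and recovering the previous prefix sum by subtracting the original element, instead of A's forward pass carrying the output accumulator.
import Mathlib
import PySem

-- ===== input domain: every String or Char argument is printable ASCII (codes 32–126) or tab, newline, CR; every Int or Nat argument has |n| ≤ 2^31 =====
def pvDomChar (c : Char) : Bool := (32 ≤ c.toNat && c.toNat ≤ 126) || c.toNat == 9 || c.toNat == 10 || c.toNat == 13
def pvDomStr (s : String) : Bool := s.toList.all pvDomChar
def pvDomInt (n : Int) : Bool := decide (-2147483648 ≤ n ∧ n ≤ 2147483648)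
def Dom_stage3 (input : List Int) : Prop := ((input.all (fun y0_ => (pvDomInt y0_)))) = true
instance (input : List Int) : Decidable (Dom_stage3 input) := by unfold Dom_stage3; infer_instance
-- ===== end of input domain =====

-- B replaces A's forward output-accumulator pass by a back-to-front fill: total sum first, then per-index closed form with the prefix sum recovered by subtraction (alternative decomposition, same cost); both Pythons mutate the list in place, the equivalence proved is about the return value.


-- ===== PORT A =====
-- A: forward pass; carry accumulator b, each step b := (b + c*0xDEAD + 1) % 0x1000, write b.
def stage3 (input : List Int) : List Int :=
  (input.foldl
    (fun (st : Int × List Int) c =>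
      let b := PySem.Int.mod (st.1 + c * 0xDEAD + 1) 0x1000
      (b, st.2 ++ [b]))
    (12314, [])).2

-- ===== PORT B =====
-- B: s := sum(input); loop over indices BACK-TO-FRONT (modelled by foldr, consing to the front
-- = writing slot i), write (12315 + i + 0xDEAD*s) % 0x1000, then s := s - original element.
def stage3_alt (input : List Int) : List Int :=
  (input.foldr
    (fun c (st : Int × Int × List Int) =>
      (st.1 - c, st.2.1 - 1,
        PySem.Int.mod (12315 + st.2.1 + 0xDEAD * st.1) 0x1000 :: st.2.2))
    (input.sum, (input.length : Int) - 1, [])).2.2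

-- ===== PRECONDITION & SPEC =====
def Spec_stage3 (input : List Int) (out : List Int) : Prop := out = stage3_alt input
instance (input : List Int) (out : List Int) : Decidable (Spec_stage3 input out) := by unfold Spec_stage3; infer_instance

-- ===== CLAIM (what is proved, stated in full; the proofs are below) =====
def Claim_equal_stage3 : Prop := ∀ (input : List Int), Dom_stage3 input → Spec_stage3 input (stage3 input)

-- ===== LEMMAS AND PROOFS =====

-- common description of the output: element at index i is (12315 + i + 57005 * S_i) % 4096,
-- where s is the prefix sum before the current element and i its index
def gOut : List Int → Int → Int → List Int
  | [], _, _ => []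
  | c :: t, s, i => (12315 + i + 57005 * (s + c)) % 4096 :: gOut t (s + c) (i + 1)

-- B's foldr: state components after folding a suffix
theorem stB (l : List Int) (S I : Int) (acc : List Int) :
    ((l.foldr
      (fun c (st : Int × Int × List Int) =>
        (st.1 - c, st.2.1 - 1,
          PySem.Int.mod (12315 + st.2.1 + 57005 * st.1) 4096 :: st.2.2))
      (S, I, acc)).1 = S - l.sum) ∧
    ((l.foldr
      (fun c (st : Int × Int × List Int) =>
        (st.1 - c, st.2.1 - 1,
          PySem.Int.mod (12315 + st.2.1 + 57005 * st.1) 4096 :: st.2.2))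
      (S, I, acc)).2.1 = I - l.length) := by
  induction l with
  | nil => simp
  | cons c t ih =>
    simp only [List.foldr_cons, List.sum_cons, List.length_cons]
    refine ⟨?_, ?_⟩
    · rw [ih.1]; ring
    · rw [ih.2]; push_cast; ring

-- B's foldr output equals gOut
theorem outB (l : List Int) (S0 I0 : Int) (acc : List Int) :
    (l.foldr
      (fun c (st : Int × Int × List Int) =>
        (st.1 - c, st.2.1 - 1,
          PySem.Int.mod (12315 + st.2.1 + 57005 * st.1) 4096 :: st.2.2))
      (S0 + l.sum, I0 + l.length - 1, acc)).2.2 = gOut l S0 I0 ++ acc := by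
  induction l generalizing S0 I0 with
  | nil => simp [gOut]
  | cons c t ih =>
    have hmod : ∀ x : Int, PySem.Int.mod x 4096 = x % 4096 := fun x =>
      PySem.Int.mod_eq_emod_of_pos (by norm_num)
    have hs : S0 + (c :: t).sum = (S0 + c) + t.sum := by simp; ring
    have hi : I0 + ((c :: t).length : Int) - 1 = (I0 + 1) + (t.length : Int) - 1 := by
      simp; ring
    rw [List.foldr_cons, hs, hi]
    have h1 := (stB t ((S0 + c) + t.sum) ((I0 + 1) + (t.length : Int) - 1) acc).1
    have h2 := (stB t ((S0 + c) + t.sum) ((I0 + 1) + (t.length : Int) - 1) acc).2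
    have h3 := ih (S0 + c) (I0 + 1)
    simp only [hmod] at h1 h2 h3 ⊢
    simp only [gOut, List.cons_append]
    rw [h1, h2, h3]
    congr 2
    ring

-- A's foldl output equals gOut, via the invariant b ≡ 12314 + i + 57005*s (mod 4096)
theorem outA (l : List Int) (b s i : Int) (acc : List Int)
    (hb : b % 4096 = (12314 + i + 57005 * s) % 4096) :
    (l.foldl
      (fun (st : Int × List Int) c =>
        let b := PySem.Int.mod (st.1 + c * 57005 + 1) 4096
        (b, st.2 ++ [b])) (b, acc)).2 = acc ++ gOut l s i := by
  induction l generalizing b s i acc with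
  | nil => simp [gOut]
  | cons c t ih =>
    have hmod : ∀ x : Int, PySem.Int.mod x 4096 = x % 4096 := fun x =>
      PySem.Int.mod_eq_emod_of_pos (by norm_num)
    have hm : Int.ModEq 4096 b (12314 + i + 57005 * s) := hb
    have hstep : (b + c * 57005 + 1) % 4096 = (12315 + i + 57005 * (s + c)) % 4096 := by
      have := (hm.add_right (c * 57005)).add_right 1
      calc (b + c * 57005 + 1) % 4096
          = ((12314 + i + 57005 * s) + c * 57005 + 1) % 4096 := this
        _ = (12315 + i + 57005 * (s + c)) % 4096 := by ring_nf
    have hinv : ((12315 + i + 57005 * (s + c)) % 4096) % 4096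
        = (12314 + (i + 1) + 57005 * (s + c)) % 4096 := by
      rw [Int.emod_emod_of_dvd _ dvd_rfl]; congr 1; ring
    simp only [hmod] at ih
    simp only [List.foldl_cons, hmod]
    rw [hstep]
    rw [ih ((12315 + i + 57005 * (s + c)) % 4096) (s + c) (i + 1)
        (acc ++ [(12315 + i + 57005 * (s + c)) % 4096]) hinv]
    simp [gOut]

-- ===== VERDICT (by name: the statement is the Claim_ definition above) =====
theorem stage3_spec : Claim_equal_stage3 := by
  intro input _
  unfold Spec_stage3 stage3 stage3_alt
  have hA := outA input 12314 0 0 [] (by norm_num)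
  have hB := outB input 0 0 []
  simp only [zero_add] at hB
  norm_num at hA hB ⊢
  rw [hA, hB]
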